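-- pv_equiv track=rewrite | github.com/Howuhh/cs_algorithms | cses_problem_set/sorting_and_searching/tasks_and_deadlines.py | max_reward
-- ===== SOURCE A (Python) =====
-- def max_reward(tasks):
--     prev_time = 0
--
--     reward = 0
--     for duration, deadline in tasks:
--         finish_time = prev_time + duration
--         reward += deadline - finish_time
--
--         prev_time = finish_time
--
--     return reward
-- ===== SOURCE B (Python) =====
-- def max_reward(tasks):
--     n = len(tasks)
--     return sum(deadline - duration * (n - i) for i, (duration, deadline) in enumerate(tasks))
-- ===== Notes on version B (the rewrite author's own statement) =====
-- stated objective: alternative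
-- what changed: Replaces the running prefix-time accumulator with a closed-form weighted sum: each task's duration is multiplied once by the number of tasks it delays (n - i), computed in a single enumerate pass with no prev_time state.
import Mathlib
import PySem

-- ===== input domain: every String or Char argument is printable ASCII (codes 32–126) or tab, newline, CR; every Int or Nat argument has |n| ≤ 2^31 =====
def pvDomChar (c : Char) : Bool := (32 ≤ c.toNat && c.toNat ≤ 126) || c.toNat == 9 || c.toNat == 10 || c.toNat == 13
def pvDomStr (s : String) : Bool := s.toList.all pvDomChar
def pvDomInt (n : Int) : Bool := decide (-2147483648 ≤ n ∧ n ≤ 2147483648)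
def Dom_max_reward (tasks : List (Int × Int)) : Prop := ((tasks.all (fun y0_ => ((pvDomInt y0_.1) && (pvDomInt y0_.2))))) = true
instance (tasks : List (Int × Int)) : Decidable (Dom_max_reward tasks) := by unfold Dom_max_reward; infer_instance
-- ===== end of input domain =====

-- B replaces A's running prefix-time accumulator by a one-pass weighted sum (duration_i weighted by n-i); alternative decomposition, same cost.


-- ===== PORT A =====
-- loop state (prev_time, reward); each step: finish = prev + duration; reward += deadline - finish
def max_reward (tasks : List (Int × Int)) : Int :=
  (tasks.foldl
    (fun st td =>
      let finish_time := st.1 + td.1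
      (finish_time, st.2 + (td.2 - finish_time)))
    (0, 0)).2

-- ===== PORT B =====
-- sum over enumerate(tasks): deadline - duration * (n - i)
def max_reward_alt (tasks : List (Int × Int)) : Int :=
  let n : Int := tasks.length
  (PySem.List.enumerate tasks 0).foldl
    (fun acc p => acc + (p.2.2 - p.2.1 * (n - p.1))) 0

-- ===== PRECONDITION & SPEC =====
def Spec_max_reward (tasks : List (Int × Int)) (out : Int) : Prop := out = max_reward_alt tasks
instance (tasks : List (Int × Int)) (out : Int) : Decidable (Spec_max_reward tasks out) := by unfold Spec_max_reward; infer_instance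

-- ===== CLAIM (what is proved, stated in full; the proofs are below) =====
def Claim_equal_max_reward : Prop := ∀ (tasks : List (Int × Int)), Dom_max_reward tasks → Spec_max_reward tasks (max_reward tasks)

-- ===== LEMMAS AND PROOFS =====
-- weighted sum G [ (d0,dl0), … ] w = Σ (dl_i - d_i * (w - i))
def pvG : List (Int × Int) → Int → Int
  | [], _ => 0
  | (d, dl) :: t, w => (dl - d * w) + pvG t (w - 1)

theorem pvG_foldA (tasks : List (Int × Int)) :
    ∀ (pt r : Int),
      (tasks.foldl
        (fun st td =>
          let finish_time := st.1 + td.1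
          (finish_time, st.2 + (td.2 - finish_time)))
        (pt, r)).2 = r - pt * tasks.length + pvG tasks tasks.length := by
  induction tasks with
  | nil => intro pt r; simp [pvG]
  | cons hd tl ih =>
      intro pt r
      simp only [List.foldl_cons, pvG, List.length_cons]
      rw [ih]
      push_cast
      ring_nf

theorem pvG_foldB (tasks : List (Int × Int)) :
    ∀ (s acc n : Int),
      (PySem.List.enumerate tasks s).foldl
        (fun acc p => acc + (p.2.2 - p.2.1 * (n - p.1))) acc
      = acc + pvG tasks (n - s) := by
  induction tasks with
  | nil => intro s acc n; simp [PySem.List.enumerate_nil, pvG]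
  | cons hd tl ih =>
      intro s acc n
      rw [PySem.List.enumerate_cons]
      simp only [List.foldl_cons]
      rw [ih]
      simp only [pvG]
      ring_nf

-- ===== VERDICT (by name: the statement is the Claim_ definition above) =====
theorem max_reward_spec : Claim_equal_max_reward := by
  intro tasks _
  show max_reward tasks = max_reward_alt tasks
  unfold max_reward max_reward_alt
  rw [pvG_foldA, pvG_foldB]
  ring_nf
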